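-- pv_equiv track=rewrite | github.com/eliottcassidy2000/math | 04-computation/betti_lambda_n8.py | compute_beta1
-- ===== SOURCE A (Python) =====
-- def compute_beta1(A, n):
--     """Fast computation of β_1 only."""
--     # β_1 = dim(ker(∂_1)) - dim(im(∂_2))
--     # dim(ker(∂_1)) = |edges| - n + #components = C(n,2) - n + 1 (tournaments are weakly connected)
--     # So we just need im(∂_2), which is rank of ∂_2 restricted to Ω_2.
--
--     # For β_1: it's simpler. β_1 = 1 iff tournament is NOT strongly connected.
--     # (Well, more precisely: β_1 counts "1-dimensional holes" in the path complex.)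
--     # For tournaments: β_1 = 1 iff tournament is NOT strongly connected.
--
--     # Actually: β_1 = C(n,2) - n + 1 - rank(∂_2|_Ω_2)
--     # This requires computing Ω_2 and ∂_2.
--
--     # Faster: use the known formula β_1 ∈ {0,1} and β_1 = 1 iff not strongly connected.
--     # Check strong connectivity.
--     from collections import deque
--     def is_strongly_connected(A, n):
--         # BFS from 0
--         visited = {0}
--         queue = deque([0])
--         while queue:
--             v = queue.popleft()
--             for u in range(n):
--                 if u not in visited and A[v][u]:
--                     visited.add(u)
--                     queue.append(u)
--         if len(visited) < n: return False
--         # BFS on transpose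
--         visited = {0}
--         queue = deque([0])
--         while queue:
--             v = queue.popleft()
--             for u in range(n):
--                 if u not in visited and A[u][v]:
--                     visited.add(u)
--                     queue.append(u)
--         return len(visited) == n
--
--     return 0 if is_strongly_connected(A, n) else 1
-- ===== SOURCE B (Python) =====
-- def compute_beta1(A, n):
--     """Fast computation of beta_1 only."""
--     # beta_1 = 1 iff tournament is not strongly connected; decide strong
--     # connectivity by round-based saturation (Bellman-Ford-style fixpoint)
--     # instead of queue-driven BFS.
--     def reach(adj):
--         # saturate the set of vertices reachable from 0 under adj
--         visited = {0}
--         for _ in range(n):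
--             visited = visited | {u for u in range(n)
--                                  if any(adj(v, u) for v in visited)}
--         return visited
--
--     fwd = reach(lambda v, u: A[v][u])
--     if len(fwd) != n:
--         return 1
--     bwd = reach(lambda v, u: A[u][v])
--     return 0 if len(bwd) == n else 1
-- ===== Notes on version B (the rewrite author's own statement) =====
-- stated objective: alternative
-- what changed: Replaces the two queue-driven BFS traversals by round-based saturation: n rounds of a monotone frontier-expansion fixpoint (Bellman-Ford-style) compute the set reachable from vertex 0 in the graph and its transpose; strong connectivity is then the same size test.
-- outside the precondition, e.g. on compute_beta1([[]], 1): A returns 0, B raises IndexError; on compute_beta1([[0, 0], [1]], 2): A returns 1, B returns 1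
import Mathlib
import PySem

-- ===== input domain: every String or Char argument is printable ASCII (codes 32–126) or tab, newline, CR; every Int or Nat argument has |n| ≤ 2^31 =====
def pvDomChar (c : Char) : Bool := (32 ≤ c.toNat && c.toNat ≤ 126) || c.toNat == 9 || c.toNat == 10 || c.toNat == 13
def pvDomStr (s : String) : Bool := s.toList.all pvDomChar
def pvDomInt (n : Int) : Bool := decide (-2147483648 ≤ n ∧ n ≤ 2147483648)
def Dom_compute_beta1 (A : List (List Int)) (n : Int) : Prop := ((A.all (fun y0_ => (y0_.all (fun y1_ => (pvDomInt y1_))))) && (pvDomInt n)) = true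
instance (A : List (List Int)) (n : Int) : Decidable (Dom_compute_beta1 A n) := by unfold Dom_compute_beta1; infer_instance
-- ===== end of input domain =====

-- B replaces A's two queue-driven BFS traversals by round-based saturation (a
-- monotone fixpoint iterated n times) — alternative decomposition, same results.

-- ===== PORT A =====

-- truthiness test of A[v][u]; total form of the lookup, exact under Pre_
def pvAdj (A : List (List Int)) (v u : Int) : Bool :=
  decide (PySem.List.pyGetD (PySem.List.pyGetD A v []) u 0 ≠ 0)

-- the body of "for u in range(n): if u not in visited and adj(v,u): add/append"
def pvBFSInner (adj : Int → Int → Bool) (n v : Int)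
    (st : PySem.Set Int × List Int) : PySem.Set Int × List Int :=
  (PySem.List.pyRange 0 n 1).foldl
    (fun st u =>
      if !(PySem.Set.contains st.1 u) && adj v u then
        (PySem.Set.add st.1 u, st.2 ++ [u])
      else st) st

-- the "while queue:" loop; fuel 2*n.toNat+2 provably suffices (fuel only guards
-- termination: with that fuel the loop always ends by emptying the queue)
def pvBFS (adj : Int → Int → Bool) (n : Int) :
    Nat → PySem.Set Int → List Int → PySem.Set Int
  | 0, visited, _ => visited
  | _ + 1, visited, [] => visited
  | fuel + 1, visited, v :: qs =>
      let st := pvBFSInner adj n v (visited, qs)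
      pvBFS adj n fuel st.1 st.2

def pvIsSC (A : List (List Int)) (n : Int) : Bool :=
  let fwd := pvBFS (fun v u => pvAdj A v u) n (2 * n.toNat + 2)
               (PySem.Set.add PySem.Set.empty 0) [0]
  if (PySem.Set.len fwd : Int) < n then false
  else
    let bwd := pvBFS (fun v u => pvAdj A u v) n (2 * n.toNat + 2)
                 (PySem.Set.add PySem.Set.empty 0) [0]
    decide ((PySem.Set.len bwd : Int) = n)

def compute_beta1 (A : List (List Int)) (n : Int) : Int :=
  if pvIsSC A n then 0 else 1

-- ===== PORT B =====

-- one saturation round: visited | {u for u in range(n) if any(adj(v,u) for v in visited)}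
def pvSatStep (adj : Int → Int → Bool) (n : Int) (V : PySem.Set Int) : PySem.Set Int :=
  (PySem.List.pyRange 0 n 1).foldl
    (fun W u => if V.any (fun v => adj v u) then PySem.Set.add W u else W) V

-- "for _ in range(n):" rounds of saturation starting from {0}
def pvSat (adj : Int → Int → Bool) (n : Int) : PySem.Set Int :=
  (PySem.List.pyRange 0 n 1).foldl (fun V _ => pvSatStep adj n V)
    (PySem.Set.add PySem.Set.empty 0)

def compute_beta1_alt (A : List (List Int)) (n : Int) : Int :=
  let fwd := pvSat (fun v u => pvAdj A v u) n
  if (PySem.Set.len fwd : Int) ≠ n then 1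
  else
    let bwd := pvSat (fun v u => pvAdj A u v) n
    if (PySem.Set.len bwd : Int) = n then 0 else 1

-- ===== PRECONDITION & SPEC =====

-- Pre_ admits matrices whose leading n×n block is fully present (n ≤ len(A) and the
-- first n rows have length ≥ n): outside it one of the two Pythons hits a missing
-- entry and raises IndexError on most inputs; on the few ragged inputs where A's BFS
-- happens never to touch the missing entry and still returns, B may raise (it reads
-- more entries), so those inputs are excluded as well.
def Pre_compute_beta1 (A : List (List Int)) (n : Int) : Prop :=
  n ≤ (A.length : Int) ∧ ∀ row ∈ A.take n.toNat, n ≤ (row.length : Int)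

instance (A : List (List Int)) (n : Int) : Decidable (Pre_compute_beta1 A n) := by
  unfold Pre_compute_beta1; infer_instance

def pvWitness_compute_beta1 : List (List Int) × Int := ([[0, 1], [0, 0]], 2)

def Spec_compute_beta1 (A : List (List Int)) (n : Int) (out : Int) : Prop := out = compute_beta1_alt A n
instance (A : List (List Int)) (n : Int) (out : Int) : Decidable (Spec_compute_beta1 A n out) := by unfold Spec_compute_beta1; infer_instance

-- ===== CLAIM (what is proved, stated in full; the proofs are below) =====
def Claim_equal_compute_beta1 : Prop := ∀ (A : List (List Int)) (n : Int), Dom_compute_beta1 A n → Pre_compute_beta1 A n → Spec_compute_beta1 A n (compute_beta1 A n)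

-- ===== LEMMAS AND PROOFS =====

inductive pvReach (adj : Int → Int → Bool) (n : Int) : Int → Prop
  | zero : pvReach adj n 0
  | step {v u : Int} : pvReach adj n v → 0 ≤ u → u < n → adj v u = true → pvReach adj n u

lemma pv_len_le (n : Int) (V : List Int) (hnd : V.Nodup)
    (hel : ∀ v ∈ V, v = 0 ∨ (0 ≤ v ∧ v < n)) : V.length ≤ n.toNat + 1 := by
  have hsub : V ⊆ (0 : Int) :: PySem.List.pyRange 0 n 1 := by
    intro v hv
    rcases hel v hv with h | h
    · simp [h]
    · exact List.mem_cons_of_mem _ ((PySem.List.mem_pyRange_one).2 ⟨h.1, h.2⟩)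
  have := (List.subperm_of_subset hnd hsub).length_le
  simpa [PySem.List.length_pyRange_one] using this

lemma pv_reach_subset (adj : Int → Int → Bool) (n : Int) (V : List Int)
    (h0 : (0 : Int) ∈ V)
    (hcl : ∀ v ∈ V, ∀ u : Int, 0 ≤ u → u < n → adj v u = true → u ∈ V) :
    ∀ x, pvReach adj n x → x ∈ V := by
  intro x h
  induction h with
  | zero => exact h0
  | step hv hu0 hun ha ih => exact hcl _ ih _ hu0 hun ha

lemma pv_len_le' (n : Int) (V : List Int) (hnd : V.Nodup)
    (hel : ∀ v ∈ V, 0 ≤ v ∧ v < n) : V.length ≤ n.toNat := by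
  have hsub : V ⊆ PySem.List.pyRange 0 n 1 := by
    intro v hv
    exact (PySem.List.mem_pyRange_one).2 ⟨by simpa using (hel v hv).1, (hel v hv).2⟩
  have := (List.subperm_of_subset hnd hsub).length_le
  simpa [PySem.List.length_pyRange_one] using this

lemma inner_mono1 (adj : Int → Int → Bool) (v : Int) :
    ∀ (L : List Int) (st : PySem.Set Int × List Int) (x : Int), x ∈ st.1 →
    x ∈ (L.foldl (fun st u =>
      if !(PySem.Set.contains st.1 u) && adj v u then
        (PySem.Set.add st.1 u, st.2 ++ [u]) else st) st).1 := by
  intro L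
  induction L with
  | nil => intro st x hx; exact hx
  | cons u L ih =>
    intro st x hx
    simp only [List.foldl_cons]
    apply ih
    split
    · exact (PySem.Set.mem_add _ _ _).2 (Or.inl hx)
    · exact hx

lemma inner_lenmono (adj : Int → Int → Bool) (v : Int) :
    ∀ (L : List Int) (st : PySem.Set Int × List Int),
    st.1.length ≤ (L.foldl (fun st u =>
      if !(PySem.Set.contains st.1 u) && adj v u then
        (PySem.Set.add st.1 u, st.2 ++ [u]) else st) st).1.length := by
  intro L
  induction L with
  | nil => intro st; exact le_refl _
  | cons u L ih =>
    intro st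
    simp only [List.foldl_cons]
    refine le_trans ?_ (ih _)
    split
    · rename_i hc
      simp only [Bool.and_eq_true, Bool.not_eq_true'] at hc
      have hnm : u ∉ st.1 := by
        intro hm
        have := (PySem.Set.contains_iff st.1 u).2 hm
        rw [hc.1] at this
        exact Bool.false_ne_true this
      rw [PySem.Set.add_of_not_mem hnm]
      simp
    · exact le_refl _

lemma inner_mono2 (adj : Int → Int → Bool) (v : Int) :
    ∀ (L : List Int) (st : PySem.Set Int × List Int) (x : Int), x ∈ st.2 →
    x ∈ (L.foldl (fun st u =>
      if !(PySem.Set.contains st.1 u) && adj v u then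
        (PySem.Set.add st.1 u, st.2 ++ [u]) else st) st).2 := by
  intro L
  induction L with
  | nil => intro st x hx; exact hx
  | cons u L ih =>
    intro st x hx
    simp only [List.foldl_cons]
    apply ih
    split
    · exact List.mem_append_left _ hx
    · exact hx

lemma inner_new (adj : Int → Int → Bool) (v : Int) :
    ∀ (L : List Int) (st : PySem.Set Int × List Int) (x : Int),
    x ∈ (L.foldl (fun st u =>
      if !(PySem.Set.contains st.1 u) && adj v u then
        (PySem.Set.add st.1 u, st.2 ++ [u]) else st) st).1 →
    x ∈ st.1 ∨ (x ∈ L ∧ adj v x = true) := by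
  intro L
  induction L with
  | nil => intro st x hx; exact Or.inl hx
  | cons u L ih =>
    intro st x hx
    simp only [List.foldl_cons] at hx
    rcases ih _ x hx with h | ⟨h1, h2⟩
    · by_cases hc : (!(PySem.Set.contains st.1 u) && adj v u) = true
      · rw [if_pos hc] at h
        rcases (PySem.Set.mem_add _ _ _).1 h with h | rfl
        · exact Or.inl h
        · simp only [Bool.and_eq_true] at hc
          exact Or.inr ⟨List.mem_cons_self .., hc.2⟩
      · rw [if_neg hc] at h
        exact Or.inl h
    · exact Or.inr ⟨List.mem_cons_of_mem _ h1, h2⟩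

lemma inner_newq (adj : Int → Int → Bool) (v : Int) :
    ∀ (L : List Int) (st : PySem.Set Int × List Int) (x : Int),
    x ∈ (L.foldl (fun st u =>
      if !(PySem.Set.contains st.1 u) && adj v u then
        (PySem.Set.add st.1 u, st.2 ++ [u]) else st) st).1 →
    x ∈ st.1 ∨ x ∈ (L.foldl (fun st u =>
      if !(PySem.Set.contains st.1 u) && adj v u then
        (PySem.Set.add st.1 u, st.2 ++ [u]) else st) st).2 := by
  intro L
  induction L with
  | nil => intro st x hx; exact Or.inl hx
  | cons u L ih =>
    intro st x hx
    simp only [List.foldl_cons] at hx ⊢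
    rcases ih _ x hx with h | h
    · by_cases hc : (!(PySem.Set.contains st.1 u) && adj v u) = true
      · rw [if_pos hc] at h
        rcases (PySem.Set.mem_add _ _ _).1 h with h | rfl
        · exact Or.inl h
        · right
          rw [if_pos hc]
          exact inner_mono2 adj v L _ x (List.mem_append_right _ (List.mem_singleton_self _))
      · rw [if_neg hc] at h
        exact Or.inl h
    · exact Or.inr h

lemma inner_qsub (adj : Int → Int → Bool) (v : Int) :
    ∀ (L : List Int) (st : PySem.Set Int × List Int),
    (∀ x ∈ st.2, x ∈ st.1) →
    ∀ x ∈ (L.foldl (fun st u =>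
      if !(PySem.Set.contains st.1 u) && adj v u then
        (PySem.Set.add st.1 u, st.2 ++ [u]) else st) st).2,
    x ∈ (L.foldl (fun st u =>
      if !(PySem.Set.contains st.1 u) && adj v u then
        (PySem.Set.add st.1 u, st.2 ++ [u]) else st) st).1 := by
  intro L
  induction L with
  | nil => intro st h x hx; exact h x hx
  | cons u L ih =>
    intro st h
    simp only [List.foldl_cons]
    apply ih
    split
    · intro x hx
      rcases List.mem_append.1 hx with h1 | h1
      · exact (PySem.Set.mem_add _ _ _).2 (Or.inl (h x h1))
      · rcases List.mem_singleton.1 h1 with rfl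
        exact (PySem.Set.mem_add _ _ _).2 (Or.inr rfl)
    · exact h

lemma inner_expand (adj : Int → Int → Bool) (v : Int) :
    ∀ (L : List Int) (st : PySem.Set Int × List Int),
    ∀ u ∈ L, adj v u = true →
    u ∈ (L.foldl (fun st u =>
      if !(PySem.Set.contains st.1 u) && adj v u then
        (PySem.Set.add st.1 u, st.2 ++ [u]) else st) st).1 := by
  intro L
  induction L with
  | nil => intro st u hu; simp at hu
  | cons w L ih =>
    intro st u hu ha
    rcases List.mem_cons.1 hu with rfl | hu
    · simp only [List.foldl_cons]
      apply inner_mono1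
      by_cases hm : u ∈ st.1
      · split
        · exact (PySem.Set.mem_add _ _ _).2 (Or.inl hm)
        · exact hm
      · have hct : PySem.Set.contains st.1 u = false := by
          rw [← Bool.not_eq_true]
          intro h
          exact hm ((PySem.Set.contains_iff st.1 u).1 h)
        have hc : (!(PySem.Set.contains st.1 u) && adj v u) = true := by
          rw [hct, ha]
          rfl
        rw [if_pos hc]
        exact (PySem.Set.mem_add _ _ _).2 (Or.inr rfl)
    · simp only [List.foldl_cons]
      exact ih _ u hu ha

lemma inner_nodup (adj : Int → Int → Bool) (v : Int) :
    ∀ (L : List Int) (st : PySem.Set Int × List Int), st.1.Nodup →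
    (L.foldl (fun st u =>
      if !(PySem.Set.contains st.1 u) && adj v u then
        (PySem.Set.add st.1 u, st.2 ++ [u]) else st) st).1.Nodup := by
  intro L
  induction L with
  | nil => intro st h; exact h
  | cons u L ih =>
    intro st h
    simp only [List.foldl_cons]
    apply ih
    split
    · exact PySem.Set.nodup_add _ _ h
    · exact h

lemma inner_len (adj : Int → Int → Bool) (v : Int) :
    ∀ (L : List Int) (st : PySem.Set Int × List Int),
    (L.foldl (fun st u =>
      if !(PySem.Set.contains st.1 u) && adj v u then
        (PySem.Set.add st.1 u, st.2 ++ [u]) else st) st).2.length + st.1.length =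
    (L.foldl (fun st u =>
      if !(PySem.Set.contains st.1 u) && adj v u then
        (PySem.Set.add st.1 u, st.2 ++ [u]) else st) st).1.length + st.2.length := by
  intro L
  induction L with
  | nil => intro st; simp only [List.foldl_nil]; omega
  | cons u L ih =>
    intro st
    simp only [List.foldl_cons]
    by_cases hc : (!(PySem.Set.contains st.1 u) && adj v u) = true
    · rw [if_pos hc]
      have := ih (PySem.Set.add st.1 u, st.2 ++ [u])
      simp only [Bool.and_eq_true, Bool.not_eq_true'] at hc
      have hnm : u ∉ st.1 := by
        intro hm
        have h2 := (PySem.Set.contains_iff st.1 u).2 hm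
        rw [hc.1] at h2
        exact Bool.false_ne_true h2
      have hlen : (PySem.Set.add st.1 u).length = st.1.length + 1 := by
        rw [PySem.Set.add_of_not_mem hnm]; simp
      simp only [List.length_append, List.length_singleton] at this ⊢
      omega
    · rw [if_neg hc]
      exact ih st

lemma pvBFS_spec (adj : Int → Int → Bool) (n : Int) :
    ∀ (fuel : Nat) (V : PySem.Set Int) (Q : List Int),
    V.Nodup → (0 : Int) ∈ V →
    (∀ v ∈ Q, v ∈ V) →
    (∀ v ∈ V, v = 0 ∨ (0 ≤ v ∧ v < n)) →
    (∀ v ∈ V, pvReach adj n v) →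
    (∀ v ∈ V, v ∉ Q → ∀ u : Int, 0 ≤ u → u < n → adj v u = true → u ∈ V) →
    Q.length + 2 * (n.toNat + 1) ≤ fuel + 2 * V.length →
    ∀ x, x ∈ pvBFS adj n fuel V Q ↔ pvReach adj n x := by
  intro fuel
  induction fuel with
  | zero =>
    intro V Q hnd h0 hQ hel hreach hdone hfuel x
    have hle := pv_len_le n V hnd hel
    have hQ0 : Q = [] := List.eq_nil_of_length_eq_zero (by omega)
    subst hQ0
    show x ∈ V ↔ pvReach adj n x
    refine ⟨fun hx => hreach x hx, pv_reach_subset adj n V h0 ?_ x⟩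
    intro v hv
    exact hdone v hv (by simp)
  | succ fuel ih =>
    intro V Q hnd h0 hQ hel hreach hdone hfuel x
    match Q with
    | [] =>
      show x ∈ V ↔ pvReach adj n x
      refine ⟨fun hx => hreach x hx, pv_reach_subset adj n V h0 ?_ x⟩
      intro v hv
      exact hdone v hv (by simp)
    | v :: qs =>
      have hstep : pvBFS adj n (fuel + 1) V (v :: qs) =
          pvBFS adj n fuel
            ((PySem.List.pyRange 0 n 1).foldl (fun st u =>
              if !(PySem.Set.contains st.1 u) && adj v u then
                (PySem.Set.add st.1 u, st.2 ++ [u]) else st) (V, qs)).1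
            ((PySem.List.pyRange 0 n 1).foldl (fun st u =>
              if !(PySem.Set.contains st.1 u) && adj v u then
                (PySem.Set.add st.1 u, st.2 ++ [u]) else st) (V, qs)).2 := rfl
      rw [hstep]
      have hvV : v ∈ V := hQ v (List.mem_cons_self ..)
      apply ih _ _ (inner_nodup adj v _ (V, qs) hnd)
        (inner_mono1 adj v _ (V, qs) 0 h0)
        (inner_qsub adj v _ (V, qs) (fun y hy => hQ y (List.mem_cons_of_mem _ hy)))
      · -- elems
        intro w hw
        rcases inner_new adj v _ (V, qs) w hw with h | ⟨h1, h2⟩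
        · exact hel w h
        · rcases (PySem.List.mem_pyRange_one).1 h1 with ⟨hl, hr⟩
          exact Or.inr ⟨hl, hr⟩
      · -- reach
        intro w hw
        rcases inner_new adj v _ (V, qs) w hw with h | ⟨h1, h2⟩
        · exact hreach w h
        · rcases (PySem.List.mem_pyRange_one).1 h1 with ⟨hl, hr⟩
          exact pvReach.step (hreach v hvV) hl hr h2
      · -- done
        intro w hw hwQ u hu0 hun ha
        rcases inner_newq adj v _ (V, qs) w hw with hwV | hwq
        · by_cases hv : w = v
          · subst hv
            exact inner_expand adj w _ (V, qs) u
              ((PySem.List.mem_pyRange_one).2 ⟨hu0, hun⟩) ha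
          · have hwqs : w ∉ qs := fun h => hwQ (inner_mono2 adj v _ (V, qs) w h)
            have hwnotQ : w ∉ v :: qs := by
              simp [hv, hwqs]
            exact inner_mono1 adj v _ (V, qs) u (hdone w hwV hwnotQ u hu0 hun ha)
        · exact absurd hwq hwQ
      · -- fuel
        have hlen := inner_len adj v (PySem.List.pyRange 0 n 1) (V, qs)
        have hmono := inner_lenmono adj v (PySem.List.pyRange 0 n 1) (V, qs)
        dsimp only at hlen hmono
        simp only [List.length_cons] at hfuel
        omega

lemma pvBFS_top (adj : Int → Int → Bool) (n : Int) :
    ∀ x, x ∈ pvBFS adj n (2 * n.toNat + 2) (PySem.Set.add PySem.Set.empty 0) [0] ↔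
      pvReach adj n x := by
  have h1 : PySem.Set.add PySem.Set.empty (0 : Int) = [0] := rfl
  rw [h1]
  apply pvBFS_spec adj n
  · simp
  · simp
  · intro v hv; exact hv
  · intro v hv
    simp at hv
    exact Or.inl hv
  · intro v hv
    simp at hv
    subst hv
    exact pvReach.zero
  · intro v hv hnv
    simp at hv
    exact absurd (by simp [hv]) hnv
  · simp
    omega

lemma pvBFS_nodup (adj : Int → Int → Bool) (n : Int) :
    ∀ (fuel : Nat) (V : PySem.Set Int) (Q : List Int), V.Nodup →
    (pvBFS adj n fuel V Q).Nodup := by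
  intro fuel
  induction fuel with
  | zero => intro V Q h; exact h
  | succ fuel ih =>
    intro V Q h
    match Q with
    | [] => exact h
    | v :: qs =>
      have hstep : pvBFS adj n (fuel + 1) V (v :: qs) =
          pvBFS adj n fuel (pvBFSInner adj n v (V, qs)).1 (pvBFSInner adj n v (V, qs)).2 := rfl
      rw [hstep]
      exact ih _ _ (inner_nodup adj v _ (V, qs) h)

lemma satFold_mem (adj : Int → Int → Bool) (V : PySem.Set Int) :
    ∀ (L : List Int) (W : PySem.Set Int) (x : Int),
    x ∈ L.foldl (fun W u => if V.any (fun v => adj v u) then PySem.Set.add W u else W) W ↔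
      x ∈ W ∨ (x ∈ L ∧ V.any (fun v => adj v x) = true) := by
  intro L
  induction L with
  | nil => simp
  | cons u L ih =>
    intro W x
    simp only [List.foldl_cons, ih, List.mem_cons]
    by_cases hc : V.any (fun v => adj v u) = true
    · simp only [hc, if_pos]
      rw [PySem.Set.mem_add]
      constructor
      · rintro (⟨h | rfl⟩ | ⟨h1, h2⟩)
        · exact Or.inl h
        · exact Or.inr ⟨Or.inl rfl, hc⟩
        · exact Or.inr ⟨Or.inr h1, h2⟩
      · rintro (h | ⟨rfl | h1, h2⟩)
        · exact Or.inl (Or.inl h)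
        · exact Or.inl (Or.inr rfl)
        · exact Or.inr ⟨h1, h2⟩
    · simp only [hc, if_neg, Bool.not_eq_true]
      constructor
      · rintro (h | ⟨h1, h2⟩)
        · exact Or.inl h
        · exact Or.inr ⟨Or.inr h1, h2⟩
      · rintro (h | ⟨rfl | h1, h2⟩)
        · exact Or.inl h
        · exact absurd h2 (by simp [hc])
        · exact Or.inr ⟨h1, h2⟩

lemma satFold_nodup (adj : Int → Int → Bool) (V : PySem.Set Int) :
    ∀ (L : List Int) (W : PySem.Set Int), W.Nodup →
    (L.foldl (fun W u => if V.any (fun v => adj v u) then PySem.Set.add W u else W) W).Nodup := by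
  intro L
  induction L with
  | nil => intro W h; simpa using h
  | cons u L ih =>
    intro W h
    simp only [List.foldl_cons]
    apply ih
    split
    · exact PySem.Set.nodup_add _ _ h
    · exact h

lemma pvSatStep_mem (adj : Int → Int → Bool) (n : Int) (V : PySem.Set Int) (x : Int) :
    x ∈ pvSatStep adj n V ↔ x ∈ V ∨ (0 ≤ x ∧ x < n ∧ ∃ v ∈ V, adj v x = true) := by
  rw [pvSatStep, satFold_mem, PySem.List.mem_pyRange_one, List.any_eq_true]
  constructor
  · rintro (h | ⟨⟨h1, h2⟩, ⟨v, hv, ha⟩⟩)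
    · exact Or.inl h
    · exact Or.inr ⟨h1, h2, v, hv, ha⟩
  · rintro (h | ⟨h1, h2, v, hv, ha⟩)
    · exact Or.inl h
    · exact Or.inr ⟨⟨h1, h2⟩, ⟨v, hv, ha⟩⟩

lemma foldl_const_iterate {α β : Type} (F : α → α) :
    ∀ (L : List β) (V : α), L.foldl (fun V _ => F V) V = F^[L.length] V := by
  intro L
  induction L with
  | nil => intro V; rfl
  | cons b L ih =>
    intro V
    simp only [List.foldl_cons, List.length_cons, ih, Function.iterate_succ_apply]

lemma pvSat_eq_iterate (adj : Int → Int → Bool) (n : Int) :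
    pvSat adj n = (pvSatStep adj n)^[n.toNat] [0] := by
  rw [pvSat, foldl_const_iterate]
  simp [PySem.List.length_pyRange_one]

-- chain basics

lemma chain_nodup (adj : Int → Int → Bool) (n : Int) :
    ∀ k : Nat, ((pvSatStep adj n)^[k] ([0] : PySem.Set Int)).Nodup := by
  intro k
  induction k with
  | zero => simp
  | succ k ih =>
    rw [Function.iterate_succ_apply']
    exact satFold_nodup adj _ _ _ ih

lemma chain_zero_mem (adj : Int → Int → Bool) (n : Int) :
    ∀ k : Nat, (0 : Int) ∈ (pvSatStep adj n)^[k] ([0] : PySem.Set Int) := by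
  intro k
  induction k with
  | zero => simp
  | succ k ih =>
    rw [Function.iterate_succ_apply']
    exact (pvSatStep_mem adj n _ 0).2 (Or.inl ih)

lemma chain_sound (adj : Int → Int → Bool) (n : Int) :
    ∀ k : Nat, ∀ x ∈ (pvSatStep adj n)^[k] ([0] : PySem.Set Int), pvReach adj n x := by
  intro k
  induction k with
  | zero => intro x hx; simp at hx; subst hx; exact pvReach.zero
  | succ k ih =>
    intro x hx
    rw [Function.iterate_succ_apply'] at hx
    rcases (pvSatStep_mem adj n _ x).1 hx with h | ⟨h1, h2, v, hv, ha⟩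
    · exact ih x h
    · exact pvReach.step (ih v hv) h1 h2 ha

lemma chain_elems (adj : Int → Int → Bool) (n : Int) (hn : 1 ≤ n) :
    ∀ k : Nat, ∀ x ∈ (pvSatStep adj n)^[k] ([0] : PySem.Set Int), 0 ≤ x ∧ x < n := by
  intro k
  induction k with
  | zero => intro x hx; simp at hx; subst hx; exact ⟨le_refl 0, hn⟩
  | succ k ih =>
    intro x hx
    rw [Function.iterate_succ_apply'] at hx
    rcases (pvSatStep_mem adj n _ x).1 hx with h | ⟨h1, h2, _⟩
    · exact ih x h
    · exact ⟨h1, h2⟩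

lemma satStep_cong (adj : Int → Int → Bool) (n : Int) (V W : PySem.Set Int)
    (h : ∀ x, x ∈ V ↔ x ∈ W) :
    ∀ x, x ∈ pvSatStep adj n V ↔ x ∈ pvSatStep adj n W := by
  intro x
  rw [pvSatStep_mem, pvSatStep_mem]
  constructor
  · rintro (hx | ⟨h1, h2, v, hv, ha⟩)
    · exact Or.inl ((h x).1 hx)
    · exact Or.inr ⟨h1, h2, v, (h v).1 hv, ha⟩
  · rintro (hx | ⟨h1, h2, v, hv, ha⟩)
    · exact Or.inl ((h x).2 hx)
    · exact Or.inr ⟨h1, h2, v, (h v).2 hv, ha⟩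

lemma stab_prop (adj : Int → Int → Bool) (n : Int) (k : Nat)
    (hstab : ∀ x, x ∈ (pvSatStep adj n)^[k+1] ([0] : PySem.Set Int) ↔
      x ∈ (pvSatStep adj n)^[k] ([0] : PySem.Set Int)) :
    ∀ j : Nat, ∀ x, x ∈ (pvSatStep adj n)^[k+j] ([0] : PySem.Set Int) ↔
      x ∈ (pvSatStep adj n)^[k] ([0] : PySem.Set Int) := by
  intro j
  induction j with
  | zero => intro x; rfl
  | succ j ih =>
    intro x
    have h1 : (pvSatStep adj n)^[k + (j+1)] ([0] : PySem.Set Int) =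
        pvSatStep adj n ((pvSatStep adj n)^[k+j] ([0] : PySem.Set Int)) := by
      have : k + (j+1) = (k+j) + 1 := by omega
      rw [this, Function.iterate_succ_apply']
    have h2 : (pvSatStep adj n)^[k+1] ([0] : PySem.Set Int) =
        pvSatStep adj n ((pvSatStep adj n)^[k] ([0] : PySem.Set Int)) := by
      rw [Function.iterate_succ_apply']
    rw [h1, satStep_cong adj n _ _ ih x, ← h2]
    exact hstab x

lemma chain_mono (adj : Int → Int → Bool) (n : Int) (k : Nat) :
    ∀ x ∈ (pvSatStep adj n)^[k] ([0] : PySem.Set Int),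
      x ∈ (pvSatStep adj n)^[k+1] ([0] : PySem.Set Int) := by
  intro x hx
  rw [Function.iterate_succ_apply']
  exact (pvSatStep_mem adj n _ x).2 (Or.inl hx)

lemma chain_growth (adj : Int → Int → Bool) (n : Int) (k : Nat)
    (h : ¬ ∀ x, x ∈ (pvSatStep adj n)^[k+1] ([0] : PySem.Set Int) ↔
      x ∈ (pvSatStep adj n)^[k] ([0] : PySem.Set Int)) :
    ((pvSatStep adj n)^[k] ([0] : PySem.Set Int)).length + 1 ≤
      ((pvSatStep adj n)^[k+1] ([0] : PySem.Set Int)).length := by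
  have hmono := chain_mono adj n k
  have hex : ∃ x, x ∈ (pvSatStep adj n)^[k+1] ([0] : PySem.Set Int) ∧
      x ∉ (pvSatStep adj n)^[k] ([0] : PySem.Set Int) := by
    by_contra hno
    apply h
    intro x
    constructor
    · intro h1
      by_cases hm : x ∈ (pvSatStep adj n)^[k] ([0] : PySem.Set Int)
      · exact hm
      · exact absurd ⟨x, h1, hm⟩ hno
    · exact hmono x
  obtain ⟨x, hx1, hx2⟩ := hex
  have hnd : (x :: (pvSatStep adj n)^[k] ([0] : PySem.Set Int)).Nodup :=
    List.nodup_cons.2 ⟨hx2, chain_nodup adj n k⟩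
  have hsub : (x :: (pvSatStep adj n)^[k] ([0] : PySem.Set Int)) ⊆
      (pvSatStep adj n)^[k+1] ([0] : PySem.Set Int) := by
    intro y hy
    rcases List.mem_cons.1 hy with rfl | hy
    · exact hx1
    · exact hmono y hy
  simpa using (List.subperm_of_subset hnd hsub).length_le

lemma chain_stab_exists (adj : Int → Int → Bool) (n : Int) (hn : 1 ≤ n) :
    ∃ k < n.toNat, ∀ x, x ∈ (pvSatStep adj n)^[k+1] ([0] : PySem.Set Int) ↔
      x ∈ (pvSatStep adj n)^[k] ([0] : PySem.Set Int) := by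
  by_contra hcon
  have hcon' : ∀ k, k < n.toNat → ¬ ∀ x,
      x ∈ (pvSatStep adj n)^[k+1] ([0] : PySem.Set Int) ↔
      x ∈ (pvSatStep adj n)^[k] ([0] : PySem.Set Int) :=
    fun k hk hp => hcon ⟨k, hk, hp⟩
  have key : ∀ j : Nat, j ≤ n.toNat →
      j + 1 ≤ ((pvSatStep adj n)^[j] ([0] : PySem.Set Int)).length := by
    intro j
    induction j with
    | zero => intro _; simp
    | succ j ih =>
      intro hj
      have h1 := ih (by omega)
      have h2 := chain_growth adj n j (hcon' j (by omega))
      omega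
  have hbig := key n.toNat (le_refl _)
  have hsmall := pv_len_le' n _ (chain_nodup adj n n.toNat) (chain_elems adj n hn n.toNat)
  omega

lemma pvSat_spec (adj : Int → Int → Bool) (n : Int) (hn : 1 ≤ n) :
    ∀ x, x ∈ pvSat adj n ↔ pvReach adj n x := by
  obtain ⟨k, hk, hstab⟩ := chain_stab_exists adj n hn
  have hVm : ∀ x, x ∈ (pvSatStep adj n)^[n.toNat] ([0] : PySem.Set Int) ↔
      x ∈ (pvSatStep adj n)^[k] ([0] : PySem.Set Int) := by
    have := stab_prop adj n k hstab (n.toNat - k)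
    intro x
    have heq : k + (n.toNat - k) = n.toNat := by omega
    rw [heq] at this
    exact this x
  intro x
  rw [pvSat_eq_iterate]
  constructor
  · exact chain_sound adj n n.toNat x
  · intro hr
    apply pv_reach_subset adj n _ (chain_zero_mem adj n n.toNat) _ x hr
    intro v hv u hu0 hun ha
    -- u ∈ F (V_m); F(V_m) ≃ F(V_k) ≃ V_k ≃ V_m
    have h1 : u ∈ pvSatStep adj n ((pvSatStep adj n)^[n.toNat] ([0] : PySem.Set Int)) :=
      (pvSatStep_mem adj n _ u).2 (Or.inr ⟨hu0, hun, v, hv, ha⟩)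
    have h2 := (satStep_cong adj n _ _ hVm u).1 h1
    have h3 : pvSatStep adj n ((pvSatStep adj n)^[k] ([0] : PySem.Set Int)) =
        (pvSatStep adj n)^[k+1] ([0] : PySem.Set Int) :=
      (Function.iterate_succ_apply' _ _ _).symm
    rw [h3] at h2
    exact (hVm u).2 ((hstab u).1 h2)

lemma pvSat_nodup (adj : Int → Int → Bool) (n : Int) : (pvSat adj n).Nodup := by
  rw [pvSat_eq_iterate]
  exact chain_nodup adj n n.toNat

lemma pv_len_eq (adj : Int → Int → Bool) (n : Int) (hn : 1 ≤ n) :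
    PySem.Set.len (pvBFS adj n (2 * n.toNat + 2) (PySem.Set.add PySem.Set.empty 0) [0]) =
      PySem.Set.len (pvSat adj n) := by
  have hiff : ∀ x, x ∈ pvBFS adj n (2 * n.toNat + 2) (PySem.Set.add PySem.Set.empty 0) [0] ↔
      x ∈ pvSat adj n :=
    fun x => (pvBFS_top adj n x).trans (pvSat_spec adj n hn x).symm
  have hnd1 : (pvBFS adj n (2 * n.toNat + 2) (PySem.Set.add PySem.Set.empty 0) [0]).Nodup := by
    apply pvBFS_nodup
    have h1 : PySem.Set.add PySem.Set.empty (0 : Int) = [0] := rfl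
    rw [h1]
    simp
  have hperm := (List.perm_ext_iff_of_nodup hnd1 (pvSat_nodup adj n)).2 hiff
  simp only [PySem.Set.len]
  exact_mod_cast hperm.length_eq

lemma pv_sat_len_le (adj : Int → Int → Bool) (n : Int) (hn : 1 ≤ n) :
    (PySem.Set.len (pvSat adj n) : Int) ≤ n := by
  have h := pv_len_le' n (pvSat adj n) (pvSat_nodup adj n) (fun x hx =>
    chain_elems adj n hn n.toNat x (by rwa [← pvSat_eq_iterate]))
  have he : PySem.Set.len (pvSat adj n) = ((pvSat adj n).length : Int) := rfl
  omega

lemma pv_branches (Lf Lb n : Int) (hle : Lf ≤ n) :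
    (if (if Lf < n then false else decide (Lb = n)) = true then (0 : Int) else 1) =
      (if Lf ≠ n then 1 else if Lb = n then 0 else 1) := by
  by_cases h1 : Lf < n
  · simp only [if_pos h1, Bool.false_eq_true, if_false]
    rw [if_pos (by omega : Lf ≠ n)]
  · have h2 : Lf = n := by omega
    by_cases h3 : Lb = n
    · simp [h2, h3]
    · simp [h2, h3]

-- ===== VERDICT (by name: the statement is the Claim_ definition above) =====
theorem compute_beta1_spec : Claim_equal_compute_beta1 := by
  unfold Claim_equal_compute_beta1
  intro A n _ _
  unfold Spec_compute_beta1
  by_cases hn : 1 ≤ n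
  · have hf := pv_len_eq (fun v u => pvAdj A v u) n hn
    have hb := pv_len_eq (fun v u => pvAdj A u v) n hn
    have e1 : compute_beta1 A n =
        (if (if (PySem.Set.len (pvBFS (fun v u => pvAdj A v u) n (2 * n.toNat + 2)
              (PySem.Set.add PySem.Set.empty 0) [0]) : Int) < n then false
            else decide ((PySem.Set.len (pvBFS (fun v u => pvAdj A u v) n (2 * n.toNat + 2)
              (PySem.Set.add PySem.Set.empty 0) [0]) : Int) = n)) = true then (0 : Int) else 1) := rfl
    have e2 : compute_beta1_alt A n =
        (if (PySem.Set.len (pvSat (fun v u => pvAdj A v u) n) : Int) ≠ n then (1 : Int)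
         else if (PySem.Set.len (pvSat (fun v u => pvAdj A u v) n) : Int) = n then 0 else 1) := rfl
    rw [e1, e2, hf, hb]
    exact pv_branches _ _ n (pv_sat_len_le _ n hn)
  · have hr : PySem.List.pyRange 0 n 1 = [] := PySem.List.pyRange_one_eq_nil (by omega)
    have hnt : n.toNat = 0 := by omega
    have hbfs : ∀ adj : Int → Int → Bool,
        pvBFS adj n (2 * n.toNat + 2) (PySem.Set.add PySem.Set.empty 0) [0] = [0] := by
      intro adj
      rw [hnt]
      show pvBFS adj n 2 [0] [0] = [0]
      have : pvBFSInner adj n 0 (([0] : PySem.Set Int), []) = ([0], []) := by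
        rw [pvBFSInner, hr]
        rfl
      show pvBFS adj n 1 (pvBFSInner adj n 0 (([0] : PySem.Set Int), [])).1
        (pvBFSInner adj n 0 (([0] : PySem.Set Int), [])).2 = [0]
      rw [this]
      rfl
    have hsat : ∀ adj : Int → Int → Bool, pvSat adj n = [0] := by
      intro adj
      rw [pvSat, hr]
      rfl
    have e1 : compute_beta1 A n =
        (if (if (PySem.Set.len (pvBFS (fun v u => pvAdj A v u) n (2 * n.toNat + 2)
              (PySem.Set.add PySem.Set.empty 0) [0]) : Int) < n then false
            else decide ((PySem.Set.len (pvBFS (fun v u => pvAdj A u v) n (2 * n.toNat + 2)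
              (PySem.Set.add PySem.Set.empty 0) [0]) : Int) = n)) = true then (0 : Int) else 1) := rfl
    have e2 : compute_beta1_alt A n =
        (if (PySem.Set.len (pvSat (fun v u => pvAdj A v u) n) : Int) ≠ n then (1 : Int)
         else if (PySem.Set.len (pvSat (fun v u => pvAdj A u v) n) : Int) = n then 0 else 1) := rfl
    rw [e1, e2, hbfs, hbfs, hsat, hsat]
    have hlen : (PySem.Set.len ([0] : PySem.Set Int) : Int) = 1 := rfl
    rw [hlen]
    have h1 : ¬ ((1 : Int) < n) := by omega
    have h2 : ((1 : Int) ≠ n) := by omega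
    simp [h1, h2]
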